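-- pv_equiv track=rewrite | github.com/xxxMATEJxxx/gomoku | timotej/player_single_pricing-no_defence.py | price
-- ===== SOURCE A (Python) =====
-- WIN = 5
--
-- def price(line):
--   length_ = len(line)
--   if length_ < WIN:
--     return(None)
--   x = 0
--   o = 0
--   price = 0
--   for i in range(WIN):
--     if line[i] == 'X':
--       x += 1
--     if line[i] == 'O':
--       o += 1
--   for i in range(length_ - WIN+1):
--     if (x != 0) and (o != 0):
--       pass
--     elif (x != 0):
--       price += 10**x
--     elif (o != 0):
--       price -= 10**o
--     try:
--       if line[i] == 'X':
--         x -= 1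
--       elif line[i] == 'O':
--         o -= 1
--       if line[i+WIN] == 'X':
--         x += 1
--       elif line[i+WIN] == 'O':
--         o += 1
--     except:
--       pass
--   return(price)
-- ===== SOURCE B (Python) =====
-- WIN = 5
--
-- def price(line):
--   if len(line) < WIN:
--     return None
--   total = 0
--   for i in range(len(line) - WIN + 1):
--     w = line[i:i + WIN]
--     x = w.count('X')
--     o = w.count('O')
--     if x and o:
--       continue
--     if x:
--       total += 10 ** x
--     elif o:
--       total -= 10 ** o
--   return total
-- ===== Notes on version B (the rewrite author's own statement) =====
-- stated objective: simpler
-- what changed: Replaces A's incrementally maintained X/O counters (with the exception-swallowing trailing update) by recomputing each size-5 window's counts freshly from a slice per position.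
import Mathlib
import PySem

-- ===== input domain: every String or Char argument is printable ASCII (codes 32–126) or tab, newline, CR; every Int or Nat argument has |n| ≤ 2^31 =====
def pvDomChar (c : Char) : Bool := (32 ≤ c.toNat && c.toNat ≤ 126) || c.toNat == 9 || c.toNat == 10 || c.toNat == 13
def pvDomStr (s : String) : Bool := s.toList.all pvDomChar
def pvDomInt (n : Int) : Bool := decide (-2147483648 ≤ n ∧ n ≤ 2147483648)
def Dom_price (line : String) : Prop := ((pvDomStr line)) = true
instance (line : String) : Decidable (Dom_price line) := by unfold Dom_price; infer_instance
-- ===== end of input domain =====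

-- B replaces A's incrementally maintained X/O counters (with the
-- exception-swallowing trailing update) by recomputing each size-5 window's
-- counts freshly from a slice per position; simpler, same return value.

-- ===== PORT A =====
-- A's first loop body (counting the initial window): i ∈ range(5) is always a
-- valid index since 5 ≤ len, so pyGetD with a dummy default is exact there.
def priceInitStep (cs : List Char) (xo : Int × Int) (i : Int) : Int × Int :=
  let x := if PySem.List.pyGetD cs i ' ' = 'X' then xo.1 + 1 else xo.1
  let o := if PySem.List.pyGetD cs i ' ' = 'O' then xo.2 + 1 else xo.2
  (x, o)

-- A's main loop body on state (x, o, price); the try/except is ported exactly: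
-- line[i] is always in range inside the loop (i ≤ len-5) so pyGetD is exact;
-- line[i+WIN] may be out of range on the last iteration — there pyGet? is none
-- (IndexError), the except swallows it and the decrement already made is kept.
def priceStepA (cs : List Char) (st : Int × Int × Int) (i : Int) : Int × Int × Int :=
  let x := st.1
  let o := st.2.1
  let p := st.2.2
  let p := if x ≠ 0 ∧ o ≠ 0 then p
           else if x ≠ 0 then p + 10 ^ x.toNat
           else if o ≠ 0 then p - 10 ^ o.toNat
           else p
  let xo : Int × Int :=
    if PySem.List.pyGetD cs i ' ' = 'X' then (x - 1, o)
    else if PySem.List.pyGetD cs i ' ' = 'O' then (x, o - 1)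
    else (x, o)
  match PySem.List.pyGet? cs (i + 5) with
  | none => (xo.1, xo.2, p)
  | some c =>
    if c = 'X' then (xo.1 + 1, xo.2, p)
    else if c = 'O' then (xo.1, xo.2 + 1, p)
    else (xo.1, xo.2, p)

def price (line : String) : Option Int :=
  let cs := line.toList
  let length_ : Int := cs.length
  if length_ < 5 then none
  else
    let xo := (PySem.List.pyRange 0 5 1).foldl (priceInitStep cs) (0, 0)
    let st := (PySem.List.pyRange 0 (length_ - 5 + 1) 1).foldl (priceStepA cs)
      (xo.1, xo.2, (0 : Int))
    some st.2.2

-- ===== PORT B =====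
def priceStepB (cs : List Char) (t : Int) (i : Nat) : Int :=
  let w := PySem.List.slice cs (some (i : Int)) (some ((i : Int) + 5))
  let x := w.count 'X'
  let o := w.count 'O'
  if x ≠ 0 ∧ o ≠ 0 then t
  else if x ≠ 0 then t + 10 ^ x
  else if o ≠ 0 then t - 10 ^ o
  else t

def price_alt (line : String) : Option Int :=
  let cs := line.toList
  if (cs.length : Int) < 5 then none
  else some ((List.range (cs.length - 5 + 1)).foldl (priceStepB cs) 0)

-- ===== PRECONDITION & SPEC =====
def Spec_price (line : String) (out : Option Int) : Prop := out = price_alt line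
instance (line : String) (out : Option Int) : Decidable (Spec_price line out) := by unfold Spec_price; infer_instance

-- ===== CLAIM (what is proved, stated in full; the proofs are below) =====
def Claim_equal_price : Prop := ∀ (line : String), Dom_price line → Spec_price line (price line)

-- ===== LEMMAS AND PROOFS =====

-- the size-5 window at position j
def pvWin (cs : List Char) (j : Nat) : List Char := (cs.drop j).take 5

theorem slice_win (cs : List Char) (j : Nat) :
    PySem.List.slice cs (some (j:Int)) (some ((j:Int)+5)) = pvWin cs j := by
  have := PySem.List.slice_natCast_add (xs := cs) (j := j) (n := 5)
  push_cast at this ⊢; exact this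

theorem stepB_eq (cs : List Char) (p : Int) (j : Nat) :
    priceStepB cs p j =
      (if ((pvWin cs j).count 'X' : Int) ≠ 0 ∧ ((pvWin cs j).count 'O' : Int) ≠ 0 then p
       else if ((pvWin cs j).count 'X' : Int) ≠ 0 then p + 10 ^ ((pvWin cs j).count 'X' : Int).toNat
       else if ((pvWin cs j).count 'O' : Int) ≠ 0 then p - 10 ^ ((pvWin cs j).count 'O' : Int).toNat
       else p) := by
  simp only [priceStepB, slice_win, Int.toNat_natCast, ne_eq, Nat.cast_eq_zero]

theorem stepA_price (cs : List Char) (j : Nat) (p : Int) :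
    (priceStepA cs (((pvWin cs j).count 'X' : Int), ((pvWin cs j).count 'O' : Int), p) (j:Int)).2.2
      = priceStepB cs p j := by
  rw [stepB_eq]
  simp only [priceStepA]
  cases hm : PySem.List.pyGet? cs ((j:Int) + 5) <;> simp [hm] <;> split_ifs <;> rfl

theorem stepA_full (cs : List Char) (j : Nat) (p : Int) (h : j + 5 < cs.length) :
    priceStepA cs (((pvWin cs j).count 'X' : Int), ((pvWin cs j).count 'O' : Int), p) (j:Int)
      = (((pvWin cs (j+1)).count 'X' : Int), ((pvWin cs (j+1)).count 'O' : Int), priceStepB cs p j) := by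
  have hj : j < cs.length := by omega
  have hj5 : j + 5 < cs.length := h
  have hget : PySem.List.pyGetD cs (j:Int) ' ' = cs[j] := by
    simp [PySem.List.pyGetD_natCast, List.getD, hj]
  have hget5 : PySem.List.pyGet? cs ((j:Int) + 5) = some cs[j+5] := by
    have hc : ((j:Int) + 5) = ((j+5 : Nat) : Int) := by push_cast; ring
    rw [hc, PySem.List.pyGet?_natCast]
    simp [hj5]
  have hw : pvWin cs j = cs[j] :: (cs.drop (j+1)).take 4 := by
    unfold pvWin
    rw [List.drop_eq_getElem_cons hj]
    rfl
  have hw' : pvWin cs (j+1) = (cs.drop (j+1)).take 4 ++ [cs[j+5]] := by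
    unfold pvWin
    have h45 : (cs.drop (j+1))[4]? = some cs[j+5] := by
      rw [List.getElem?_drop]
      simp [show j + 1 + 4 = j + 5 from by omega, hj5]
    calc List.take 5 (cs.drop (j+1)) = List.take (4+1) (cs.drop (j+1)) := rfl
      _ = List.take 4 (cs.drop (j+1)) ++ ((cs.drop (j+1))[4]?).toList := List.take_add_one
      _ = _ := by rw [h45]; rfl
  rw [stepB_eq]
  simp only [priceStepA, hget, hget5, hw, hw']
  simp only [List.count_cons, List.count_append]
  by_cases h1 : cs[j] = 'X' <;> by_cases h2 : cs[j] = 'O' <;>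
    by_cases h3 : cs[j+5] = 'X' <;> by_cases h4 : cs[j+5] = 'O' <;>
      simp_all <;> push_cast <;> constructor <;> ring

theorem pvCountFold (l : List Char) (x o : Int) :
    l.foldl (fun (xo : Int × Int) c =>
      (if c = 'X' then xo.1 + 1 else xo.1, if c = 'O' then xo.2 + 1 else xo.2)) (x, o)
    = (x + l.count 'X', o + l.count 'O') := by
  induction l generalizing x o with
  | nil => simp
  | cons a l ih =>
    simp only [List.foldl_cons, ih, List.count_cons]
    refine Prod.ext ?_ ?_ <;> simp only [beq_iff_eq] <;> split_ifs <;> push_cast <;> ring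

theorem pvInitCount (cs : List Char) (h5 : 5 ≤ cs.length) :
    (PySem.List.pyRange 0 5 1).foldl (priceInitStep cs) (0, 0)
    = (((pvWin cs 0).count 'X' : Int), ((pvWin cs 0).count 'O' : Int)) := by
  have hlen : ((cs.take 5).length : Int) = 5 := by simp [List.length_take]; omega
  have hcong : (PySem.List.pyRange 0 5 1).foldl (priceInitStep cs) (0, 0)
      = (PySem.List.pyRange 0 5 1).foldl (priceInitStep (cs.take 5)) (0, 0) := by
    refine PySem.List.foldl_congr_mem _ _ _ _ ?_
    intro acc i hi
    rw [PySem.List.mem_pyRange_one] at hi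
    obtain ⟨n, rfl⟩ := Int.eq_ofNat_of_zero_le hi.1
    have hn : n < 5 := by exact_mod_cast hi.2
    simp [priceInitStep, PySem.List.pyGetD_natCast, List.getD, List.getElem?_take_of_lt hn]
  rw [hcong]
  calc (PySem.List.pyRange 0 5 1).foldl (priceInitStep (cs.take 5)) (0, 0)
      = (PySem.List.pyRange 0 ((cs.take 5).length : Int) 1).foldl (priceInitStep (cs.take 5)) (0, 0) := by
        rw [hlen]
    _ = (cs.take 5).foldl (fun (xo : Int × Int) c =>
          (if c = 'X' then xo.1 + 1 else xo.1, if c = 'O' then xo.2 + 1 else xo.2)) (0, 0) :=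
        PySem.List.foldl_pyRange_zero_pyGetD' (cs.take 5) ' '
          (fun (xo : Int × Int) c =>
            (if c = 'X' then xo.1 + 1 else xo.1, if c = 'O' then xo.2 + 1 else xo.2)) (0, 0)
    _ = _ := by rw [pvCountFold]; simp [pvWin]

theorem pvLoopEq (cs : List Char) (k j : Nat) (p : Int)
    (h : j + 4 + k = cs.length) :
    ((PySem.List.pyRange (j : Int) ((j : Int) + (k : Int)) 1).foldl (priceStepA cs)
      (((pvWin cs j).count 'X' : Int), ((pvWin cs j).count 'O' : Int), p)).2.2
    = (List.range' j k).foldl (priceStepB cs) p := by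
  induction k generalizing j p with
  | zero =>
    rw [PySem.List.pyRange_one_eq_nil (by push_cast; omega)]
    simp
  | succ k ih =>
    rw [PySem.List.pyRange_one_cons (by push_cast; omega), List.range'_succ]
    simp only [List.foldl_cons]
    cases k with
    | zero =>
      rw [PySem.List.pyRange_one_eq_nil (by push_cast; omega)]
      simp only [List.foldl_nil, List.range'_zero]
      exact stepA_price cs j p
    | succ k' =>
      rw [stepA_full cs j p (by omega)]
      have := ih (j + 1) (priceStepB cs p j) (by omega)
      convert this using 3 <;> push_cast <;> ring

-- ===== VERDICT (by name: the statement is the Claim_ definition above) =====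
theorem price_spec : Claim_equal_price := by
  intro line _
  unfold Spec_price price price_alt
  set cs := line.toList with hcs
  by_cases hlt : (cs.length : Int) < 5
  · simp [hlt]
  · have h5 : 5 ≤ cs.length := by omega
    simp only [hlt, if_false]
    rw [pvInitCount cs h5]
    have hb : (((0:Nat)) : Int) + ((cs.length - 4 : Nat) : Int) = (cs.length : Int) - 5 + 1 := by
      push_cast [h5]; omega
    have hr : PySem.List.pyRange 0 ((cs.length : Int) - 5 + 1) 1
        = PySem.List.pyRange ((0:Nat) : Int) (((0:Nat) : Int) + ((cs.length - 4 : Nat) : Int)) 1 := by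
      rw [hb]; norm_num
    rw [hr, pvLoopEq cs (cs.length - 4) 0 0 (by omega)]
    rw [show cs.length - 5 + 1 = cs.length - 4 from by omega, List.range_eq_range']
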